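-- pv_equiv track=rewrite | github.com/MichiganNLP/vlog_action_recognition | classify/preprocess.py | split_train_test_val_data
-- ===== SOURCE A (Python) =====
-- from collections import OrderedDict
--
-- def split_train_test_val_data(dict_video_actions, channel_test, channel_val):
--     dict_train_data = OrderedDict()
--     dict_test_data = OrderedDict()
--     dict_val_data = OrderedDict()
--
--     for channel in range(1, 11):
--         if channel == channel_test or channel == channel_val:
--             continue
--         for key in dict_video_actions.keys():
--             # if str(channel) + "p" in key or 'p' not in key[:-3]:
--             if str(channel) + "p" in key:
--                 dict_train_data[key] = dict_video_actions[key]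
--
--     for channel in range(channel_val, channel_val + 1):
--         for key in dict_video_actions.keys():
--             if str(channel) + "p" in key:
--                 dict_val_data[key] = dict_video_actions[key]
--
--     for channel in range(channel_test, channel_test + 1):
--         for key in dict_video_actions.keys():
--             if str(channel) + "p" in key:
--                 dict_test_data[key] = dict_video_actions[key]
--
--     return dict_train_data, dict_test_data, dict_val_data
-- ===== SOURCE B (Python) =====
-- from collections import OrderedDict
--
-- def split_train_test_val_data(dict_video_actions, channel_test, channel_val):
--     # Index each channel 1..10 to its matching keys in one pass over the keys.
--     buckets = {}
--     for key in dict_video_actions: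
--         for channel in range(1, 11):
--             if str(channel) + "p" in key:
--                 buckets.setdefault(channel, []).append(key)
--
--     dict_train_data = OrderedDict()
--     for channel in range(1, 11):
--         if channel == channel_test or channel == channel_val:
--             continue
--         for key in buckets.get(channel, []):
--             dict_train_data[key] = dict_video_actions[key]
--
--     def single_channel(channel):
--         d = OrderedDict()
--         for key in dict_video_actions:
--             if str(channel) + "p" in key:
--                 d[key] = dict_video_actions[key]
--         return d
--
--     return dict_train_data, single_channel(channel_test), single_channel(channel_val)
-- ===== Notes on version B (the rewrite author's own statement) =====
-- stated objective: alternative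
-- what changed: The train split is assembled from a channel->keys index built in one pass over the keys (channel buckets), instead of A's eight repeated full scans of the keys; the single-channel test/val scans are kept direct so channels outside 1..10 behave identically.
import Mathlib
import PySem

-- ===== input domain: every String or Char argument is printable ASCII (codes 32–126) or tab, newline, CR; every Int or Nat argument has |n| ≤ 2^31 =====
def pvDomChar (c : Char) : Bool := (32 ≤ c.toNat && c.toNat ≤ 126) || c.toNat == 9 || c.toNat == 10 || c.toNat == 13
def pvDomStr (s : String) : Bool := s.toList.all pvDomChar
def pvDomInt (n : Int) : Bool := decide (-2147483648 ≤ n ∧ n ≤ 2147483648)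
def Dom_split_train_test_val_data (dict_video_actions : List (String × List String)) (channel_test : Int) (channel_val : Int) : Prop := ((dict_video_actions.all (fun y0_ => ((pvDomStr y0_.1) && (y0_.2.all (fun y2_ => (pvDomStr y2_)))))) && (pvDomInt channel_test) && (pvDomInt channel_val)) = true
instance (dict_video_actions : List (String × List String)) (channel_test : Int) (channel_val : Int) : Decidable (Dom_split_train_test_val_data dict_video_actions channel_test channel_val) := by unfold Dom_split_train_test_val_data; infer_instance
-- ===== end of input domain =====

-- B replaces A's eight full key-scans for the train split by one index-building pass over the
-- keys plus an assembly from per-channel buckets (alternative decomposition, same cost class).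


-- ===== PORT A =====
-- the inner `for key in dict_video_actions.keys(): if str(channel)+"p" in key: d[key] = dict_video_actions[key]`
-- loop, shared verbatim by both Pythons (A uses it for train/val/test, B only for val/test)
def pvChannelScan (dict_video_actions : List (String × List String)) (c : Int)
    (d : PySem.Dict String (List String)) : PySem.Dict String (List String) :=
  dict_video_actions.foldl
    (fun d kv =>
      if PySem.Str.isIn (PySem.Int.toStr c ++ "p") kv.1 then
        d.insert kv.1 ((PySem.Dict.mk dict_video_actions).getD kv.1 [])
      else d) d

def split_train_test_val_data (dict_video_actions : List (String × List String)) (channel_test : Int) (channel_val : Int) : (List (String × List String)) × (List (String × List String)) × (List (String × List String)) :=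
  let dict_train_data :=
    (PySem.List.pyRange 1 11 1).foldl
      (fun d channel =>
        if channel == channel_test || channel == channel_val then d
        else pvChannelScan dict_video_actions channel d) PySem.Dict.empty
  let dict_val_data :=
    (PySem.List.pyRange channel_val (channel_val + 1) 1).foldl
      (fun d channel => pvChannelScan dict_video_actions channel d) PySem.Dict.empty
  let dict_test_data :=
    (PySem.List.pyRange channel_test (channel_test + 1) 1).foldl
      (fun d channel => pvChannelScan dict_video_actions channel d) PySem.Dict.empty
  (dict_train_data.items, dict_test_data.items, dict_val_data.items)

-- ===== PORT B =====
-- one pass over the keys: buckets.setdefault(channel, []).append(key) for each matching channel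
def pvBuckets (dict_video_actions : List (String × List String)) : PySem.Dict Int (List String) :=
  dict_video_actions.foldl
    (fun b kv =>
      (PySem.List.pyRange 1 11 1).foldl
        (fun b channel =>
          if PySem.Str.isIn (PySem.Int.toStr channel ++ "p") kv.1 then
            b.modify channel [] (· ++ [kv.1])
          else b) b)
    PySem.Dict.empty

def split_train_test_val_data_alt (dict_video_actions : List (String × List String)) (channel_test : Int) (channel_val : Int) : (List (String × List String)) × (List (String × List String)) × (List (String × List String)) :=
  let buckets := pvBuckets dict_video_actions
  let dict_train_data :=
    (PySem.List.pyRange 1 11 1).foldl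
      (fun d channel =>
        if channel == channel_test || channel == channel_val then d
        else (buckets.getD channel []).foldl
          (fun d key => d.insert key ((PySem.Dict.mk dict_video_actions).getD key [])) d)
      PySem.Dict.empty
  (dict_train_data.items,
   (pvChannelScan dict_video_actions channel_test PySem.Dict.empty).items,
   (pvChannelScan dict_video_actions channel_val PySem.Dict.empty).items)

-- ===== PRECONDITION & SPEC =====
def Spec_split_train_test_val_data (dict_video_actions : List (String × List String)) (channel_test : Int) (channel_val : Int) (out : (List (String × List String)) × (List (String × List String)) × (List (String × List String))) : Prop := out = split_train_test_val_data_alt dict_video_actions channel_test channel_val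
instance (dict_video_actions : List (String × List String)) (channel_test : Int) (channel_val : Int) (out : (List (String × List String)) × (List (String × List String)) × (List (String × List String))) : Decidable (Spec_split_train_test_val_data dict_video_actions channel_test channel_val out) := by unfold Spec_split_train_test_val_data; infer_instance

-- ===== CLAIM (what is proved, stated in full; the proofs are below) =====
def Claim_equal_split_train_test_val_data : Prop := ∀ (dict_video_actions : List (String × List String)) (channel_test : Int) (channel_val : Int), Dom_split_train_test_val_data dict_video_actions channel_test channel_val → Spec_split_train_test_val_data dict_video_actions channel_test channel_val (split_train_test_val_data dict_video_actions channel_test channel_val)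

-- ===== LEMMAS AND PROOFS =====

-- a conditional-insert scan over the pairs is an unconditional insert fold over the filtered keys
theorem pv_scan_eq_filter_fold (dva : List (String × List String)) (p : String → Bool)
    (f : String → List String) :
    ∀ d : PySem.Dict String (List String),
      dva.foldl (fun d kv => if p kv.1 then d.insert kv.1 (f kv.1) else d) d
        = ((dva.map Prod.fst).filter p).foldl (fun d k => d.insert k (f k)) d := by
  induction dva with
  | nil => intro d; rfl
  | cons kv t ih =>
    intro d
    by_cases h : p kv.1 = true <;> simp [h, ih]

-- effect of the inner channel loop (one key) on one bucket
theorem pv_inner_getD (key : String) (c : Int) (cs : List Int) (hnd : cs.Nodup) :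
    ∀ b : PySem.Dict Int (List String),
      (cs.foldl
        (fun b channel =>
          if PySem.Str.isIn (PySem.Int.toStr channel ++ "p") key then
            b.modify channel [] (· ++ [key])
          else b) b).getD c []
      = b.getD c [] ++ (if c ∈ cs ∧ PySem.Str.isIn (PySem.Int.toStr c ++ "p") key then [key] else []) := by
  induction cs with
  | nil => intro b; simp
  | cons c' t ih =>
    intro b
    rcases List.nodup_cons.mp hnd with ⟨hc', hndt⟩
    rw [List.foldl_cons]
    by_cases hm : PySem.Str.isIn (PySem.Int.toStr c' ++ "p") key = true
    · rw [if_pos hm, ih hndt]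
      rw [PySem.Dict.getD_modify]
      by_cases hcc : c = c'
      · subst hcc
        rw [if_pos rfl, if_neg (by exact fun h => hc' h.1), if_pos ⟨List.mem_cons_self, hm⟩]
        simp
      · rw [if_neg hcc]
        by_cases hct : c ∈ t
        · simp [hct, hcc]
        · have : c ∉ (c' :: t) := by simp [hcc, hct]
          simp [hct, this]
    · rw [if_neg hm, ih hndt]
      by_cases hcc : c = c'
      · subst hcc
        have : ¬ (c ∈ t ∧ PySem.Str.isIn (PySem.Int.toStr c ++ "p") key = true) :=
          fun h => hc' h.1
        rw [if_neg this, if_neg (fun h => hm h.2)]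
      · by_cases hct : c ∈ t
        · simp [hct, hcc]
        · have : c ∉ (c' :: t) := by simp [hcc, hct]
          simp [hct, this]

-- the bucket of a channel in 1..10 is exactly the filtered key list, in key order
theorem pv_buckets_getD (dva : List (String × List String)) (c : Int)
    (hc : c ∈ PySem.List.pyRange 1 11 1) :
    (pvBuckets dva).getD c []
      = (dva.map Prod.fst).filter (fun k => PySem.Str.isIn (PySem.Int.toStr c ++ "p") k) := by
  unfold pvBuckets
  suffices h : ∀ b : PySem.Dict Int (List String),
      (dva.foldl
        (fun b kv =>
          (PySem.List.pyRange 1 11 1).foldl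
            (fun b channel =>
              if PySem.Str.isIn (PySem.Int.toStr channel ++ "p") kv.1 then
                b.modify channel [] (· ++ [kv.1])
              else b) b) b).getD c []
      = b.getD c [] ++ (dva.map Prod.fst).filter (fun k => PySem.Str.isIn (PySem.Int.toStr c ++ "p") k) by
    simpa using h PySem.Dict.empty
  induction dva with
  | nil => intro b; simp
  | cons kv t ih =>
    intro b
    rw [List.foldl_cons, ih]
    rw [pv_inner_getD kv.1 c _ (PySem.List.nodup_pyRange_one 1 11)]
    rw [List.map_cons]
    by_cases hm : PySem.Str.isIn (PySem.Int.toStr c ++ "p") kv.1 = true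
    · rw [if_pos ⟨hc, hm⟩, List.filter_cons_of_pos hm, List.append_assoc]
      rfl
    · rw [if_neg (fun h => hm h.2), List.filter_cons_of_neg (by simpa using hm)]
      simp

-- A's per-channel scan equals B's bucket fold, for channels in 1..10
theorem pv_step_eq (dva : List (String × List String)) (c : Int)
    (hc : c ∈ PySem.List.pyRange 1 11 1) (d : PySem.Dict String (List String)) :
    pvChannelScan dva c d
      = ((pvBuckets dva).getD c []).foldl
          (fun d key => d.insert key ((PySem.Dict.mk dva).getD key [])) d := by
  rw [pv_buckets_getD dva c hc]
  unfold pvChannelScan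
  exact pv_scan_eq_filter_fold dva (fun k => PySem.Str.isIn (PySem.Int.toStr c ++ "p") k) (fun k => (PySem.Dict.mk dva).getD k []) d

-- ===== VERDICT (by name: the statement is the Claim_ definition above) =====
theorem split_train_test_val_data_spec : Claim_equal_split_train_test_val_data := by
  intro dva ct cv _
  unfold Spec_split_train_test_val_data split_train_test_val_data split_train_test_val_data_alt
  have htrain :
      (PySem.List.pyRange 1 11 1).foldl
        (fun d channel =>
          if channel == ct || channel == cv then d
          else pvChannelScan dva channel d) PySem.Dict.empty
      = (PySem.List.pyRange 1 11 1).foldl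
        (fun d channel =>
          if channel == ct || channel == cv then d
          else ((pvBuckets dva).getD channel []).foldl
            (fun d key => d.insert key ((PySem.Dict.mk dva).getD key [])) d)
        PySem.Dict.empty := by
    apply PySem.List.foldl_congr_mem
    intro d c hcmem
    by_cases h : (c == ct || c == cv) = true
    · simp [h]
    · simp only [h, Bool.false_eq_true, if_false]
      exact pv_step_eq dva c hcmem d
  simp only [htrain, PySem.List.pyRange_one_singleton, List.foldl_cons, List.foldl_nil]
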